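-- pv_equiv track=rewrite | github.com/ldept/University | 2019-2020/Zima/Python/Lista05/zad3.py | image_col
-- ===== SOURCE A (Python) =====
-- import itertools
--
-- def image_col(H,V):
--     H_possibilities = list(itertools.product([1,0], repeat=len(H)))
--
--     column_possibilities = []
--     for i in range(len(H)):
--         column_possibilities.append(list(filter(lambda x : sum(x) == H[i],H_possibilities)))
--
--     #total has all possible columns
--     total = itertools.product(*column_possibilities)
--     for columns in total:
--         rows = [sum(x) for x in zip(*columns)]
--         if rows == V:
--             return columns
--
--     return []
-- ===== SOURCE B (Python) =====
-- def image_col(H, V):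
--     n = len(H)
--     if len(V) != n or sum(V) != sum(H):
--         # a 0/1 matrix with column sums H and row sums V needs len(V) == len(H) here
--         # (A compares against the n row sums) and sum(V) == sum(H)
--         return []
--
--     def gen(m, s):
--         # 0/1 sequences of length m summing to s, in product([1,0]) filter order
--         if m == 0:
--             return [[]] if s == 0 else []
--         return [[1] + t for t in gen(m - 1, s - 1)] + [[0] + t for t in gen(m - 1, s)]
--
--     def dfs(cands, cur):
--         rem = len(cands)
--         if any(c > v or c + rem < v for c, v in zip(cur, V)):
--             return None
--         if not cands:
--             return []
--         for col in cands[0]: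
--             res = dfs(cands[1:], [c + x for c, x in zip(cur, col)])
--             if res is not None:
--                 return [col] + res
--         return None
--
--     res = dfs([gen(n, h) for h in H], [0] * n)
--     return [] if res is None else res
-- ===== Notes on version B (the rewrite author's own statement) =====
-- stated objective: faster
-- what changed: Instead of filtering all 2^n bit-vectors per column and scanning the full cartesian product of column choices, B generates each column's candidates directly by recursion on (length,sum) and runs a DFS over columns in the same order with partial row-sum branch-and-bound pruning (prune when a row sum already exceeds its target or cannot reach it with the remaining columns), returning the same first solution.
import Mathlib
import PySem

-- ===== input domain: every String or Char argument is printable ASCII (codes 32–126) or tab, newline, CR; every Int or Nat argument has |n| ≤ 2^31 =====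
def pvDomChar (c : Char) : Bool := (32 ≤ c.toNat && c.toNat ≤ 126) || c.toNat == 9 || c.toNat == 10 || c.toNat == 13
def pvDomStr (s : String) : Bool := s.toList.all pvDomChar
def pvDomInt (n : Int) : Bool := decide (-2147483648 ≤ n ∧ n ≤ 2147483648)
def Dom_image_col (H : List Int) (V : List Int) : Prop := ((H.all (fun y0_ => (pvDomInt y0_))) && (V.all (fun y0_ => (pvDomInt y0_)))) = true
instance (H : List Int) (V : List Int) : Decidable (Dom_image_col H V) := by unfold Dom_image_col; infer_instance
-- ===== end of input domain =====

-- B replaces A's "filter 2^n bit-vectors per column, then scan the whole cartesian product"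
-- by direct candidate generation per column and a pruned DFS in the same order (faster).

-- ===== PORT A =====
-- itertools.product([1,0], repeat=n)
def prodRep : Nat → List (List Int)
  | 0 => [[]]
  | n+1 => ([1, 0] : List Int).flatMap (fun b => (prodRep n).map (fun t => b :: t))

-- itertools.product(*lists)
def cartA : List (List (List Int)) → List (List (List Int))
  | [] => [[]]
  | l :: ls => l.flatMap (fun c => (cartA ls).map (fun t => c :: t))

-- Python zip(*columns): truncates at the shortest list; zip() of no lists is empty
def pyZipCols (ls : List (List Int)) : List (List Int) :=
  match ls with
  | [] => []
  | x :: xs =>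
    if h : (x :: xs).any (fun l => l.isEmpty) then []
    else ((x :: xs).map (fun l => l.headI)) :: pyZipCols ((x :: xs).map (fun l => l.tail))
termination_by ls.headI.length
decreasing_by
  simp only [List.any_cons, Bool.or_eq_true, not_or] at h
  simp only [List.map_cons, List.headI]
  cases x with
  | nil => simp at h
  | cons a t => simp

def image_col (H : List Int) (V : List Int) : List (List Int) :=
  let Hposs := prodRep H.length
  let colposs := H.map (fun h => Hposs.filter (fun x => x.sum == h))
  match (cartA colposs).find? (fun columns => ((pyZipCols columns).map (fun r => r.sum)) == V) with
  | some c => c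
  | none => []

-- ===== PORT B =====
-- gen(m, s): 0/1 sequences of length m summing to s, 1-branch first
def genB : Nat → Int → List (List Int)
  | 0, s => if s == 0 then [[]] else []
  | m+1, s => ((genB m (s-1)).map (fun t => (1:Int) :: t)) ++ ((genB m s).map (fun t => (0:Int) :: t))

-- [c + x for c, x in zip(cur, col)]
def vadd (cur col : List Int) : List Int := (cur.zip col).map (fun p => p.1 + p.2)

-- dfs(cands, cur)
def dfsB (V : List Int) (cands : List (List (List Int))) (cur : List Int) :
    Option (List (List Int)) :=
  if (cur.zip V).any (fun p => p.1 > p.2 || p.1 + (cands.length : Int) < p.2) then none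
  else
    match cands with
    | [] => some []
    | cs :: rest => cs.findSome? (fun col => (dfsB V rest (vadd cur col)).map (fun r => col :: r))
termination_by cands.length
decreasing_by simp

def image_col_alt (H : List Int) (V : List Int) : List (List Int) :=
  if V.length == H.length && V.sum == H.sum then
    match dfsB V (H.map (fun h => genB H.length h)) (List.replicate H.length 0) with
    | some r => r
    | none => []
  else []

-- ===== PRECONDITION & SPEC =====
def Spec_image_col (H : List Int) (V : List Int) (out : List (List Int)) : Prop := out = image_col_alt H V
instance (H : List Int) (V : List Int) (out : List (List Int)) : Decidable (Spec_image_col H V out) := by unfold Spec_image_col; infer_instance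

-- ===== CLAIM (what is proved, stated in full; the proofs are below) =====
def Claim_equal_image_col : Prop := ∀ (H : List Int) (V : List Int), Dom_image_col H V → Spec_image_col H V (image_col H V)

-- ===== LEMMAS AND PROOFS =====

theorem mem_prodRep {n : Nat} {x : List Int} (hx : x ∈ prodRep n) :
    x.length = n ∧ ∀ e ∈ x, e = 0 ∨ e = 1 := by
  induction n generalizing x with
  | zero => simp [prodRep] at hx; simp [hx]
  | succ m ih =>
    simp [prodRep, List.flatMap] at hx
    rcases hx with ⟨t, ht, rfl⟩ | ⟨t, ht, rfl⟩ <;> obtain ⟨hl, he⟩ := ih ht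
    · refine ⟨by simp [hl], ?_⟩
      intro e he'
      rcases List.mem_cons.mp he' with rfl | h
      · exact Or.inr rfl
      · exact he _ h
    · refine ⟨by simp [hl], ?_⟩
      intro e he'
      rcases List.mem_cons.mp he' with rfl | h
      · exact Or.inl rfl
      · exact he _ h

theorem genB_eq (n : Nat) (s : Int) :
    genB n s = (prodRep n).filter (fun x => x.sum == s) := by
  induction n generalizing s with
  | zero =>
    simp only [genB, prodRep, List.filter_cons, List.filter_nil, List.sum_nil]
    by_cases h : s = 0
    · subst h; simp
    · rw [if_neg (by simp [h]), if_neg (by simp; exact fun hh => h hh.symm)]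
  | succ m ih =>
    have hp : prodRep (m+1) =
        ((prodRep m).map (fun t => (1:Int) :: t)) ++ ((prodRep m).map (fun t => (0:Int) :: t)) := by
      simp [prodRep, List.flatMap]
    rw [genB, hp, List.filter_append, List.filter_map, List.filter_map, ih, ih]
    congr 1
    · congr 1
      apply List.filter_congr
      intro t _
      simp only [Function.comp_apply, List.sum_cons]
      by_cases h : t.sum = s - 1 <;> simp [h] <;> omega
    · congr 1
      apply List.filter_congr
      intro t _
      simp only [Function.comp_apply, List.sum_cons]
      by_cases h : t.sum = s <;> simp [h] <;> omega

theorem mem_cartA {Ls : List (List (List Int))} {cs : List (List Int)} :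
    cs ∈ cartA Ls ↔ List.Forall₂ (· ∈ ·) cs Ls := by
  induction Ls generalizing cs with
  | nil => simp [cartA, List.forall₂_nil_right_iff]
  | cons l ls ih =>
    simp only [cartA, List.mem_flatMap, List.mem_map, List.forall₂_cons_right_iff]
    constructor
    · rintro ⟨c, hc, t, ht, rfl⟩
      exact ⟨c, t, hc, ih.mp ht, rfl⟩
    · rintro ⟨c, t, hc, ht, rfl⟩
      exact ⟨c, hc, t, ih.mpr ht, rfl⟩

theorem mem_of_mem_cartA {Ls : List (List (List Int))} {cs : List (List Int)} {c : List Int}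
    (hcs : cs ∈ cartA Ls) (hc : c ∈ cs) : ∃ l ∈ Ls, c ∈ l := by
  induction Ls generalizing cs with
  | nil =>
    simp [cartA] at hcs
    subst hcs
    simp at hc
  | cons l ls ih =>
    rw [mem_cartA, List.forall₂_cons_right_iff] at hcs
    obtain ⟨a, t, ha, ht, rfl⟩ := hcs
    rcases List.mem_cons.mp hc with rfl | h
    · exact ⟨l, by simp, ha⟩
    · obtain ⟨l', hl', hcl'⟩ := ih (mem_cartA.mpr ht) h
      exact ⟨l', by simp [hl'], hcl'⟩

theorem find?_flatMap (p : List (List Int) → Bool) (f : List Int → List (List (List Int)))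
    (l : List (List Int)) :
    (l.flatMap f).find? p = l.findSome? (fun a => (f a).find? p) := by
  induction l with
  | nil => simp
  | cons a l ih =>
    simp only [List.flatMap_cons, List.find?_append, List.findSome?_cons, ih]
    cases (f a).find? p <;> simp

theorem findSome?_congr {α β : Type} (f g : α → Option β) (l : List α)
    (h : ∀ a ∈ l, f a = g a) : l.findSome? f = l.findSome? g := by
  induction l with
  | nil => simp
  | cons a l ih =>
    simp only [List.findSome?_cons, h a (by simp)]
    cases g a with
    | none => exact ih (fun x hx => h x (by simp [hx]))
    | some b => rfl

theorem find?_congr' {α : Type} (p q : α → Bool) (l : List α)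
    (h : ∀ a ∈ l, p a = q a) : l.find? p = l.find? q := by
  induction l with
  | nil => simp
  | cons a l ih =>
    simp only [List.find?_cons, h a (by simp)]
    cases q a <;> simp_all

theorem vadd_len (a b : List Int) : (vadd a b).length = min a.length b.length := by
  simp [vadd]

theorem vadd_replicate_right (a : List Int) : vadd a (List.replicate a.length 0) = a := by
  induction a with
  | nil => rfl
  | cons x t ih => simpa [vadd, List.replicate] using ih

theorem vadd_replicate_left (a : List Int) : vadd (List.replicate a.length 0) a = a := by
  induction a with
  | nil => rfl
  | cons x t ih => simpa [vadd, List.replicate] using ih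

theorem vadd_assoc' (a b d : List Int) : vadd (vadd a b) d = vadd a (vadd b d) := by
  induction a generalizing b d with
  | nil => simp [vadd]
  | cons x t ih =>
    cases b with
    | nil => simp [vadd]
    | cons y u =>
      cases d with
      | nil => simp [vadd]
      | cons z w => simpa [vadd, Int.add_assoc] using ih u w

theorem step_bound {c cur : List Int} (hlen : c.length = cur.length)
    (h01 : ∀ x ∈ c, x = 0 ∨ x = 1) :
    List.Forall₂ (fun a b => a ≤ b ∧ b ≤ a + 1) cur (vadd cur c) := by
  induction c generalizing cur with
  | nil =>
    have : cur = [] := by cases cur <;> simp_all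
    simp [this, vadd]
  | cons x t ih =>
    cases cur with
    | nil => simp at hlen
    | cons y u =>
      simp only [vadd, List.zip_cons_cons, List.map_cons]
      constructor
      · rcases h01 x (by simp) with rfl | rfl <;> omega
      · exact ih (by simpa using hlen) (fun e he => h01 e (by simp [he]))

theorem bound_comp {x y z : List Int} {k m : Int}
    (h1 : List.Forall₂ (fun a b => a ≤ b ∧ b ≤ a + k) x y)
    (h2 : List.Forall₂ (fun a b => a ≤ b ∧ b ≤ a + m) y z) :
    List.Forall₂ (fun a b => a ≤ b ∧ b ≤ a + (k + m)) x z := by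
  induction h1 generalizing z with
  | nil => cases h2; exact List.Forall₂.nil
  | cons hab h ih =>
    cases h2 with
    | cons hbc h' => exact List.Forall₂.cons ⟨by omega, by omega⟩ (ih h')

theorem forall₂_self_bound (cur : List Int) {k : Int} (hk : 0 ≤ k) :
    List.Forall₂ (fun a b => a ≤ b ∧ b ≤ a + k) cur cur := by
  rw [List.forall₂_same]
  intro x _
  omega

theorem bound_cart {cands : List (List (List Int))} {cs : List (List Int)} {cur : List Int}
    (hwf : ∀ l ∈ cands, ∀ c ∈ l, c.length = cur.length ∧ ∀ x ∈ c, x = 0 ∨ x = 1)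
    (hcs : cs ∈ cartA cands) :
    List.Forall₂ (fun a b => a ≤ b ∧ b ≤ a + (cands.length : Int)) cur (cs.foldl vadd cur) := by
  induction cands generalizing cs cur with
  | nil =>
    simp [cartA] at hcs
    subst hcs
    exact forall₂_self_bound cur (by simp)
  | cons l ls ih =>
    rw [mem_cartA, List.forall₂_cons_right_iff] at hcs
    obtain ⟨c, t, hc, ht, rfl⟩ := hcs
    obtain ⟨hclen, hc01⟩ := hwf l (by simp) c hc
    have step := step_bound hclen hc01
    have hcur' : (vadd cur c).length = cur.length := by
      rw [vadd_len, hclen]; omega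
    have tail := ih (cur := vadd cur c) (cs := t)
      (fun l' hl' c' hc' => by
        obtain ⟨h1, h2⟩ := hwf l' (by simp [hl']) c' hc'
        exact ⟨by rw [h1, hcur'], h2⟩)
      (mem_cartA.mpr ht)
    simp only [List.foldl_cons]
    refine (bound_comp step tail).imp ?_
    intro a b hab
    refine ⟨hab.1, ?_⟩
    have := hab.2
    simp only [List.length_cons] at this ⊢
    push_cast at this ⊢
    omega

theorem zipAny_false {cur V : List Int} (hlen : cur.length = V.length) (k : Int) :
    ((cur.zip V).any (fun p => p.1 > p.2 || p.1 + k < p.2) = false ↔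
      List.Forall₂ (fun a b => a ≤ b ∧ b ≤ a + k) cur V) := by
  induction cur generalizing V with
  | nil =>
    have : V = [] := by cases V <;> simp_all
    simp [this]
  | cons x t ih =>
    cases V with
    | nil => simp at hlen
    | cons y u =>
      simp only [List.zip_cons_cons, List.any_cons, Bool.or_eq_false_iff,
        List.forall₂_cons, ih (by simpa using hlen)]
      constructor
      · rintro ⟨h1, h2⟩
        refine ⟨?_, h2⟩
        simp only [Bool.or_eq_false_iff, decide_eq_false_iff_not, not_lt] at h1
        exact ⟨h1.1, h1.2⟩
      · rintro ⟨⟨h1, h2⟩, h3⟩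
        refine ⟨?_, h3⟩
        simp only [Bool.or_eq_false_iff, decide_eq_false_iff_not, not_lt]
        exact ⟨h1, h2⟩

theorem forall₂_zero_eq {cur V : List Int}
    (h : List.Forall₂ (fun a b => a ≤ b ∧ b ≤ a + (0 : Int)) cur V) : cur = V := by
  induction h with
  | nil => rfl
  | cons hab h ih => simp_all; omega

theorem dfsB_eq_find (V : List Int) (cands : List (List (List Int))) (cur : List Int)
    (hcur : cur.length = V.length)
    (hwf : ∀ l ∈ cands, ∀ c ∈ l, c.length = V.length ∧ ∀ x ∈ c, x = 0 ∨ x = 1) :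
    dfsB V cands cur = (cartA cands).find? (fun cs => cs.foldl vadd cur == V) := by
  induction cands generalizing cur with
  | nil =>
    rw [dfsB]
    simp only [List.length_nil, Nat.cast_zero]
    by_cases h : (cur.zip V).any (fun p => p.1 > p.2 || p.1 + (0 : Int) < p.2)
    · simp only [h, if_true]
      have hne : cur ≠ V := by
        intro heq
        have hfalse := (zipAny_false hcur 0).mpr (by rw [heq]; exact forall₂_self_bound V le_rfl)
        rw [h] at hfalse
        simp at hfalse
      simp [cartA, List.find?, hne]
    · rw [Bool.not_eq_true] at h
      simp only [h, Bool.false_eq_true, if_false]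
      have : cur = V := forall₂_zero_eq ((zipAny_false hcur 0).mp h)
      simp [cartA, List.find?, this]
  | cons l ls ih =>
    rw [dfsB]
    by_cases h : (cur.zip V).any (fun p => p.1 > p.2 || p.1 + (((l :: ls).length : Nat) : Int) < p.2)
    · simp only [h, if_true]
      symm
      rw [List.find?_eq_none]
      intro cs hcs hp
      have heq : cs.foldl vadd cur = V := by simpa using hp
      have hb := bound_cart (cands := l :: ls) (cur := cur)
        (fun l' hl' c hc => by
          obtain ⟨h1, h2⟩ := hwf l' hl' c hc
          exact ⟨by rw [h1, hcur], h2⟩) hcs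
      rw [heq] at hb
      have hfalse := (zipAny_false hcur (((l :: ls).length : Nat) : Int)).mpr hb
      rw [h] at hfalse
      simp at hfalse
    · rw [Bool.not_eq_true] at h
      simp only [h, Bool.false_eq_true, if_false]
      rw [show cartA (l :: ls) = l.flatMap (fun c => (cartA ls).map (fun t => c :: t)) from rfl]
      rw [find?_flatMap]
      apply findSome?_congr
      intro c hc
      obtain ⟨hclen, hc01⟩ := hwf l (by simp) c hc
      have hcur' : (vadd cur c).length = V.length := by
        rw [vadd_len, hclen, hcur]; omega
      rw [ih (vadd cur c) hcur' (fun l' hl' c' hc' => hwf l' (by simp [hl']) c' hc')]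
      rw [List.find?_map]
      rfl

-- rowsN n cs: Python's [sum(x) for x in zip(*cs)], seen as replicate n 0 when cs = []
def rowsN (n : Nat) (cs : List (List Int)) : List Int :=
  if cs = [] then List.replicate n 0 else (pyZipCols cs).map (fun r => r.sum)

theorem rowsN_zero {cs : List (List Int)} (h : ∀ c ∈ cs, c.length = 0) : rowsN 0 cs = [] := by
  cases cs with
  | nil => simp [rowsN]
  | cons x xs =>
    have hx : x = [] := by have := h x (by simp); cases x <;> simp_all
    rw [rowsN, if_neg (by simp), pyZipCols]
    simp [hx]

theorem rowsN_succ {n : Nat} {cs : List (List Int)} (h : ∀ c ∈ cs, c.length = n + 1) :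
    rowsN (n+1) cs = ((cs.map (fun l => l.headI)).sum) :: rowsN n (cs.map (fun l => l.tail)) := by
  cases cs with
  | nil => simp [rowsN, List.replicate]
  | cons x xs =>
    have hne : ∀ c ∈ x :: xs, c ≠ [] := by
      intro c hc hceq
      have := h c hc
      simp [hceq] at this
    rw [rowsN, if_neg (by simp), pyZipCols]
    rw [dif_neg (by
      intro hcontra
      simp only [List.any_eq_true] at hcontra
      obtain ⟨c, hc, hce⟩ := hcontra
      exact hne c hc (List.isEmpty_iff.mp hce))]
    simp only [List.map_cons, List.sum_cons]
    rw [rowsN, if_neg (by simp)]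

theorem rowsN_length {n : Nat} {cs : List (List Int)} (h : ∀ c ∈ cs, c.length = n) :
    (rowsN n cs).length = n := by
  induction n generalizing cs with
  | zero => simp [rowsN_zero h]
  | succ m ih =>
    rw [rowsN_succ h]
    simp only [List.length_cons]
    have htails : ∀ c ∈ cs.map (fun l => l.tail), c.length = m := by
      intro c hc
      simp only [List.mem_map] at hc
      obtain ⟨d, hd, rfl⟩ := hc
      have := h d hd
      simp [List.length_tail, this]
    rw [ih htails]

theorem rowsN_cons {n : Nat} {c : List Int} {cs : List (List Int)}
    (hc : c.length = n) (h : ∀ c' ∈ cs, c'.length = n) :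
    rowsN n (c :: cs) = vadd c (rowsN n cs) := by
  induction n generalizing c cs with
  | zero =>
    have hcnil : c = [] := by cases c <;> simp_all
    rw [rowsN_zero (by
      intro d hd
      rcases List.mem_cons.mp hd with rfl | hd
      · exact hc
      · exact h d hd)]
    simp [hcnil, vadd]
  | succ m ih =>
    cases c with
    | nil => simp at hc
    | cons a t =>
      have hall : ∀ d ∈ (a :: t) :: cs, d.length = m + 1 := by
        intro d hd
        rcases List.mem_cons.mp hd with rfl | hd
        · exact hc
        · exact h d hd
      rw [rowsN_succ hall, rowsN_succ h]
      simp only [List.map_cons, List.sum_cons, List.headI, List.tail_cons]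
      have htails : ∀ d ∈ cs.map (fun l => l.tail), d.length = m := by
        intro d hd
        simp only [List.mem_map] at hd
        obtain ⟨e, he, rfl⟩ := hd
        have := h e he
        simp [List.length_tail, this]
      rw [ih (by simpa using hc) htails]
      simp [vadd, Int.add_assoc]

theorem foldl_vadd_rowsN {n : Nat} {cs : List (List Int)} (cur : List Int)
    (hcur : cur.length = n) (h : ∀ c ∈ cs, c.length = n) :
    cs.foldl vadd cur = vadd cur (rowsN n cs) := by
  induction cs generalizing cur with
  | nil =>
    have hr : rowsN n [] = List.replicate n 0 := by simp [rowsN]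
    rw [List.foldl_nil, hr, ← hcur, vadd_replicate_right]
  | cons c cs ih =>
    simp only [List.foldl_cons]
    rw [ih (vadd cur c) (by rw [vadd_len, hcur, h c (by simp)]; omega)
      (fun d hd => h d (by simp [hd]))]
    rw [rowsN_cons (h c (by simp)) (fun d hd => h d (by simp [hd]))]
    rw [vadd_assoc']

theorem cart_member_wf {H : List Int} {n : Nat} {cs : List (List Int)} {c : List Int}
    (hcs : cs ∈ cartA (H.map (fun h => (prodRep n).filter (fun x => x.sum == h))))
    (hc : c ∈ cs) : c.length = n ∧ ∀ x ∈ c, x = 0 ∨ x = 1 := by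
  obtain ⟨l, hl, hcl⟩ := mem_of_mem_cartA hcs hc
  simp only [List.mem_map] at hl
  obtain ⟨h, _, rfl⟩ := hl
  exact mem_prodRep (List.mem_of_mem_filter hcl)

theorem cart_length {H : List Int} {n : Nat} {cs : List (List Int)}
    (hcs : cs ∈ cartA (H.map (fun h => (prodRep n).filter (fun x => x.sum == h)))) :
    cs.length = H.length := by
  rw [mem_cartA] at hcs
  simpa using hcs.length_eq

theorem sum_vadd {a b : List Int} (h : a.length = b.length) :
    (vadd a b).sum = a.sum + b.sum := by
  induction a generalizing b with
  | nil =>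
    have : b = [] := by cases b <;> simp_all
    simp [this, vadd]
  | cons x t ih =>
    cases b with
    | nil => simp at h
    | cons y u =>
      have := ih (b := u) (by simpa using h)
      simp only [vadd, List.zip_cons_cons, List.map_cons, List.sum_cons] at this ⊢
      omega

theorem foldl_vadd_sum {n : Nat} {cs : List (List Int)} {cur : List Int}
    (hcur : cur.length = n) (hlens : ∀ c ∈ cs, c.length = n) :
    (cs.foldl vadd cur).sum = cur.sum + (cs.map List.sum).sum := by
  induction cs generalizing cur with
  | nil => simp
  | cons c cs ih =>
    have hc := hlens c (by simp)
    have hlen' : (vadd cur c).length = n := by rw [vadd_len, hcur, hc]; omega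
    simp only [List.foldl_cons, List.map_cons, List.sum_cons]
    rw [ih hlen' (fun d hd => hlens d (by simp [hd]))]
    rw [sum_vadd (by rw [hcur, hc])]
    omega

theorem cart_sum {H : List Int} {n : Nat} {cs : List (List Int)}
    (hcs : cs ∈ cartA (H.map (fun h => (prodRep n).filter (fun x => x.sum == h)))) :
    (cs.map List.sum).sum = H.sum := by
  rw [mem_cartA, List.forall₂_map_right_iff] at hcs
  induction hcs with
  | nil => simp
  | cons hch hrest ih =>
    rename_i c h cs' H'
    have : c.sum = h := by
      have := (List.mem_filter.mp hch).2
      simpa using this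
    simp [this, ih]

theorem image_col_eq_find (H V : List Int) :
    image_col H V =
      match (cartA (H.map (fun h => (prodRep H.length).filter (fun x => x.sum == h)))).find?
          (fun cs => cs.foldl vadd (List.replicate H.length 0) == V) with
      | some c => c
      | none => [] := by
  rw [image_col]
  congr 1
  apply find?_congr'
  intro cs hcs
  have hwfc : ∀ c ∈ cs, c.length = H.length ∧ ∀ x ∈ c, x = 0 ∨ x = 1 :=
    fun c hc => cart_member_wf hcs hc
  have hlen := cart_length hcs
  have hfold : cs.foldl vadd (List.replicate H.length 0) = rowsN H.length cs := by
    rw [foldl_vadd_rowsN (n := H.length) _ (by simp) (fun c hc => (hwfc c hc).1)]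
    have : (rowsN H.length cs).length = H.length := rowsN_length (fun c hc => (hwfc c hc).1)
    nth_rewrite 1 [← this]
    rw [vadd_replicate_left]
  rw [hfold]
  congr 1
  rw [rowsN]
  split
  · rename_i hnil
    subst hnil
    have hH : H.length = 0 := by simpa using hlen.symm
    rw [hH]
    simp [pyZipCols]
  · rfl

theorem rowsN_ne_of_length {H V : List Int} {cs : List (List Int)}
    (hne : V.length ≠ H.length)
    (hcs : cs ∈ cartA (H.map (fun h => (prodRep H.length).filter (fun x => x.sum == h)))) :
    (cs.foldl vadd (List.replicate H.length 0) == V) = false := by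
  have hwfc : ∀ c ∈ cs, c.length = H.length ∧ ∀ x ∈ c, x = 0 ∨ x = 1 :=
    fun c hc => cart_member_wf hcs hc
  have hfold : cs.foldl vadd (List.replicate H.length 0) = rowsN H.length cs := by
    rw [foldl_vadd_rowsN (n := H.length) _ (by simp) (fun c hc => (hwfc c hc).1)]
    have : (rowsN H.length cs).length = H.length := rowsN_length (fun c hc => (hwfc c hc).1)
    nth_rewrite 1 [← this]
    rw [vadd_replicate_left]
  rw [hfold, beq_eq_false_iff_ne]
  intro heq
  apply hne
  rw [← heq, rowsN_length (fun c hc => (hwfc c hc).1)]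

-- ===== VERDICT (by name: the statement is the Claim_ definition above) =====
theorem image_col_spec : Claim_equal_image_col := by
  intro H V _
  unfold Spec_image_col
  rw [image_col_eq_find, image_col_alt]
  by_cases hlen : V.length = H.length
  case neg =>
    rw [if_neg (by simp [hlen])]
    rw [List.find?_eq_none.mpr (fun cs hcs => by
      rw [Bool.not_eq_true]
      exact rowsN_ne_of_length hlen hcs)]
  by_cases hsum : V.sum = H.sum
  case neg =>
    rw [if_neg (by simp [hsum])]
    rw [List.find?_eq_none.mpr (fun cs hcs => by
      rw [Bool.not_eq_true, beq_eq_false_iff_ne]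
      intro heq
      apply hsum
      have h1 : (cs.foldl vadd (List.replicate H.length 0)).sum
          = (cs.map List.sum).sum := by
        rw [foldl_vadd_sum (n := H.length) (by simp)
          (fun c hc => (cart_member_wf hcs hc).1)]
        simp
      rw [← heq, h1, cart_sum hcs])]
  · rw [if_pos (by simp [hlen, hsum])]
    have hcands : H.map (fun h => genB H.length h)
        = H.map (fun h => (prodRep H.length).filter (fun x => x.sum == h)) := by
      apply List.map_congr_left
      intro h _
      exact genB_eq H.length h
    rw [hcands]
    rw [dfsB_eq_find V _ _ (by simp [hlen]) (fun l hl c hc => by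
      simp only [List.mem_map] at hl
      obtain ⟨h, _, rfl⟩ := hl
      have := mem_prodRep (List.mem_of_mem_filter hc)
      exact ⟨by rw [this.1, hlen], this.2⟩)]
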